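-- pv_equiv track=rewrite | github.com/Aman4uall/aoc | aoc/publish.py | _build_caption_register_sections
-- ===== SOURCE A (Python) =====
-- def _caption_register_lines(markdown_text: str, caption_prefix: str) -> list[str]:
--     lines: list[str] = []
--     for line in markdown_text.splitlines():
--         stripped = line.strip()
--         if stripped.startswith(f"**{caption_prefix} ") and stripped.endswith("**"):
--             lines.append(stripped.strip("*"))
--     return lines
--
-- def _build_caption_register_sections(markdown_text: str) -> str:
--     table_lines = _caption_register_lines(markdown_text, "Table")
--     figure_lines = _caption_register_lines(markdown_text, "Figure")
--     table_entries = [f"- {line}" for line in table_lines] or ["- No numbered tables captured."]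
--     figure_entries = [f"- {line}" for line in figure_lines] or ["- No numbered figures captured."]
--     sections = [
--         "## List of Tables",
--         "",
--         *table_entries,
--         "",
--         "## List of Figures",
--         "",
--         *figure_entries,
--     ]
--     return "\n".join(sections).strip()
-- ===== SOURCE B (Python) =====
-- def _build_caption_register_sections(markdown_text: str) -> str:
--     # single pass over the lines, collecting both registers at once
--     table_lines: list[str] = []
--     figure_lines: list[str] = []
--     for line in markdown_text.splitlines():
--         stripped = line.strip()
--         if stripped.endswith("**"):
--             if stripped.startswith("**Table "):
--                 table_lines.append("- " + stripped.strip("*"))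
--             elif stripped.startswith("**Figure "):
--                 figure_lines.append("- " + stripped.strip("*"))
--     if not table_lines:
--         table_lines = ["- No numbered tables captured."]
--     if not figure_lines:
--         figure_lines = ["- No numbered figures captured."]
--     return "\n".join(
--         ["## List of Tables", ""]
--         + table_lines
--         + ["", "## List of Figures", ""]
--         + figure_lines
--     ).strip()
-- ===== Notes on version B (the rewrite author's own statement) =====
-- stated objective: simpler
-- what changed: Replaces the two sequential helper scans (one per caption prefix) plus a later dash-prefix mapping pass with a single loop over the lines that classifies each stripped line once and appends the finished dash-prefixed entry directly to the matching register.
import Mathlib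
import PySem

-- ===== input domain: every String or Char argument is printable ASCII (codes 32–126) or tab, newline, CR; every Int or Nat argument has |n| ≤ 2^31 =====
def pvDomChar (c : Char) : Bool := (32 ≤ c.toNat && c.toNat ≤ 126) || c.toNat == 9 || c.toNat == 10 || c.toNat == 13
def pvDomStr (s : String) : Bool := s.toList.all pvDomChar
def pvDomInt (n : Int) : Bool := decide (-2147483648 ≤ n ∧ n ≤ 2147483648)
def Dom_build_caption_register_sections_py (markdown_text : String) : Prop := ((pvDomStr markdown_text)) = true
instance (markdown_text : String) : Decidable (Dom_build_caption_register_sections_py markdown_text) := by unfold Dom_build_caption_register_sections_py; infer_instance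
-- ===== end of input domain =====

-- B merges A's two sequential caption scans (one per prefix) and the later "- " mapping
-- into a single classifying pass over the lines; same output, objective: simpler.

-- ===== PORT A =====
-- port of _caption_register_lines
def caption_register_lines_py (markdown_text : String) (caption_prefix : String) : List String :=
  (PySem.Str.splitlines markdown_text).foldl
    (fun lines line =>
      let stripped := PySem.Str.strip line
      if PySem.Str.startswith stripped ("**" ++ caption_prefix ++ " ") &&
         PySem.Str.endswith stripped "**" then
        lines ++ [PySem.Str.stripChars stripped "*"]
      else lines) []

def build_caption_register_sections_py (markdown_text : String) : String :=
  let table_lines := caption_register_lines_py markdown_text "Table"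
  let figure_lines := caption_register_lines_py markdown_text "Figure"
  let table_entries :=
    let m := table_lines.map (fun line => "- " ++ line)
    if m = [] then ["- No numbered tables captured."] else m
  let figure_entries :=
    let m := figure_lines.map (fun line => "- " ++ line)
    if m = [] then ["- No numbered figures captured."] else m
  let sections :=
    ["## List of Tables", ""] ++ table_entries ++ ["", "## List of Figures", ""] ++ figure_entries
  PySem.Str.strip (PySem.Str.join "\n" sections)

-- ===== PORT B =====
def build_caption_register_sections_py_alt (markdown_text : String) : String :=
  let p := (PySem.Str.splitlines markdown_text).foldl
    (fun (acc : List String × List String) line =>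
      let stripped := PySem.Str.strip line
      if PySem.Str.endswith stripped "**" then
        if PySem.Str.startswith stripped "**Table " then
          (acc.1 ++ ["- " ++ PySem.Str.stripChars stripped "*"], acc.2)
        else if PySem.Str.startswith stripped "**Figure " then
          (acc.1, acc.2 ++ ["- " ++ PySem.Str.stripChars stripped "*"])
        else acc
      else acc) ([], [])
  let table_lines := if p.1 = [] then ["- No numbered tables captured."] else p.1
  let figure_lines := if p.2 = [] then ["- No numbered figures captured."] else p.2
  PySem.Str.strip (PySem.Str.join "\n"
    (["## List of Tables", ""] ++ table_lines ++ ["", "## List of Figures", ""] ++ figure_lines))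

-- ===== PRECONDITION & SPEC =====
def Spec_build_caption_register_sections_py (markdown_text : String) (out : String) : Prop := out = build_caption_register_sections_py_alt markdown_text
instance (markdown_text : String) (out : String) : Decidable (Spec_build_caption_register_sections_py markdown_text out) := by unfold Spec_build_caption_register_sections_py; infer_instance

-- ===== CLAIM (what is proved, stated in full; the proofs are below) =====
def Claim_equal_build_caption_register_sections_py : Prop := ∀ (markdown_text : String), Dom_build_caption_register_sections_py markdown_text → Spec_build_caption_register_sections_py markdown_text (build_caption_register_sections_py markdown_text)

-- ===== LEMMAS AND PROOFS =====

-- a line cannot start with both "**Table " and "**Figure "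
theorem pv_disjoint (s : List Char)
    (h : PySem.Chars.startswith s ['*','*','F','i','g','u','r','e',' '] = true) :
    PySem.Chars.startswith s ['*','*','T','a','b','l','e',' '] = false := by
  by_contra hT
  rw [Bool.not_eq_false] at hT
  rw [PySem.Chars.startswith_iff] at h hT
  rcases (List.prefix_or_prefix_of_prefix hT h) with hc | hc <;> revert hc <;> decide

def pvEntry (line : String) : String := "- " ++ PySem.Str.stripChars (PySem.Str.strip line) "*"

def pvCondT (line : String) : Bool :=
  PySem.Str.endswith (PySem.Str.strip line) "**" &&
  PySem.Str.startswith (PySem.Str.strip line) "**Table "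

def pvCondF (line : String) : Bool :=
  PySem.Str.endswith (PySem.Str.strip line) "**" &&
  PySem.Str.startswith (PySem.Str.strip line) "**Figure "

-- B's single pass computes the two filtered/mapped registers
theorem pv_loopB (ls : List String) (a b : List String) :
    ls.foldl
      (fun (acc : List String × List String) line =>
        let stripped := PySem.Str.strip line
        if PySem.Str.endswith stripped "**" then
          if PySem.Str.startswith stripped "**Table " then
            (acc.1 ++ ["- " ++ PySem.Str.stripChars stripped "*"], acc.2)
          else if PySem.Str.startswith stripped "**Figure " then
            (acc.1, acc.2 ++ ["- " ++ PySem.Str.stripChars stripped "*"])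
          else acc
        else acc) (a, b)
    = (a ++ (ls.filter pvCondT).map pvEntry, b ++ (ls.filter pvCondF).map pvEntry) := by
  induction ls generalizing a b with
  | nil => simp
  | cons x xs ih =>
    simp only [List.foldl_cons, List.filter_cons]
    simp at ih
    by_cases he : PySem.Chars.endswith (PySem.Chars.strip x.toList) ['*','*'] = true
    · by_cases ht : PySem.Chars.startswith (PySem.Chars.strip x.toList) ['*','*','T','a','b','l','e',' '] = true
      · have hf : PySem.Chars.startswith (PySem.Chars.strip x.toList) ['*','*','F','i','g','u','r','e',' '] = false := by
          by_contra hf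
          rw [Bool.not_eq_false] at hf
          rw [pv_disjoint _ hf] at ht
          exact absurd ht (by simp)
        simp [pvCondT, pvCondF, he, ht, hf, ih, pvEntry]
      · by_cases hf : PySem.Chars.startswith (PySem.Chars.strip x.toList) ['*','*','F','i','g','u','r','e',' '] = true
        · simp [pvCondT, pvCondF, he, ht, hf, ih, pvEntry]
        · simp [pvCondT, pvCondF, he, ht, hf, ih, pvEntry]
    · simp [pvCondT, pvCondF, he, ih, pvEntry]

-- A's helper loop is a filter of the lines
theorem pv_loopA (m : String) (p : String)
    (c : String → Bool)
    (hc : ∀ line, c line =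
      (PySem.Str.startswith (PySem.Str.strip line) ("**" ++ p ++ " ") &&
       PySem.Str.endswith (PySem.Str.strip line) "**")) :
    caption_register_lines_py m p
      = ((PySem.Str.splitlines m).filter c).map
          (fun line => PySem.Str.stripChars (PySem.Str.strip line) "*") := by
  unfold caption_register_lines_py
  rw [PySem.List.foldl_append_if
    (p := fun line => PySem.Str.startswith (PySem.Str.strip line) ("**" ++ p ++ " ") &&
       PySem.Str.endswith (PySem.Str.strip line) "**")
    (f := fun line => PySem.Str.stripChars (PySem.Str.strip line) "*")]
  simp only [List.nil_append]
  congr 1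
  apply List.filter_congr
  intro x _
  rw [hc]

-- ===== VERDICT (by name: the statement is the Claim_ definition above) =====
theorem build_caption_register_sections_py_spec : Claim_equal_build_caption_register_sections_py := by
  intro m _
  unfold Spec_build_caption_register_sections_py
  unfold build_caption_register_sections_py build_caption_register_sections_py_alt
  rw [pv_loopB, pv_loopA m "Table" pvCondT, pv_loopA m "Figure" pvCondF]
  · simp only [List.nil_append, List.map_map,
      show ((fun line => "- " ++ line) ∘ fun line => PySem.Str.stripChars (PySem.Str.strip line) "*") = pvEntry from rfl]
  · intro line; unfold pvCondF; rw [Bool.and_comm]; rfl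
  · intro line; unfold pvCondT; rw [Bool.and_comm]; rfl
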